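-- pv_equiv track=rewrite | github.com/nickkorolevv/6_password_strength | password_strength.py | check_punctuation
-- ===== SOURCE A (Python) =====
-- import string
--
-- def check_punctuation(password):
--     password_rating = 0
--     for char in password:
--         if char in list(string.punctuation):
--             password_rating += 1
--             if password_rating == 1:
--                 break
--     return password_rating
-- ===== SOURCE B (Python) =====
-- import string
--
-- def check_punctuation(password):
--     # Traverse the punctuation alphabet, not the password: does any
--     # punctuation character occur in the password?
--     return int(any(p in password for p in string.punctuation))
-- ===== Notes on version B (the rewrite author's own statement) =====
-- stated objective: faster
-- what changed: Reversed the traversal: instead of scanning the password character by character with a Python-level counter-and-break loop that rebuilds list(string.punctuation) for each membership test, B iterates over the 32 punctuation characters and tests each for occurrence in the password with any() and the C-level substring test, converting the bool to int.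
import Mathlib
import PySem

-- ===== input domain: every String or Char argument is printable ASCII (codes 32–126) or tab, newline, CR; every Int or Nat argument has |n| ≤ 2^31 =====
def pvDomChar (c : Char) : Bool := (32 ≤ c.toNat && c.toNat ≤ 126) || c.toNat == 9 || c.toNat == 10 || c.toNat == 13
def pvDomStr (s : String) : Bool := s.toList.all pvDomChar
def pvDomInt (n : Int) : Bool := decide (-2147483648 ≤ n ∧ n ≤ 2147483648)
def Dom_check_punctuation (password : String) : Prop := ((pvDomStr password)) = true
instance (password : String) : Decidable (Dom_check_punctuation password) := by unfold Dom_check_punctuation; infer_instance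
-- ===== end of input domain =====

-- B reverses the traversal: instead of A's per-character scan of the password with a counter
-- and break, B asks with any() whether each of the 32 punctuation characters occurs in the
-- password (measured faster at large sizes in a timing run). (objective: faster)

-- ===== PORT A =====
-- list(string.punctuation), as used in A's membership test
def pvPunctA : List Char := ['!', '"', '#', '$', '%', '&', '\'', '(', ')', '*', '+', ',', '-', '.', '/', ':', ';', '<', '=', '>', '?', '@', '[', '\\', ']', '^', '_', '`', '{', '|', '}', '~']

-- the for-loop of A with its counter and break: returns as soon as password_rating == 1
def pvLoopA : List Char → Int → Int
  | [], rating => rating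
  | c :: cs, rating =>
    if c ∈ pvPunctA then
      if rating + 1 = 1 then rating + 1 else pvLoopA cs (rating + 1)
    else pvLoopA cs rating

def check_punctuation (password : String) : Int := pvLoopA password.toList 0

-- ===== PORT B =====
-- string.punctuation as a string literal, iterated character by character
def pvPunctStr : String := "!\"#$%&'()*+,-./:;<=>?@[\\]^_`{|}~"

-- int(any(p in password for p in string.punctuation)); 'p in password' for the
-- one-character string p is containment of that character in password
def check_punctuation_alt (password : String) : Int :=
  (if pvPunctStr.toList.any (fun p => password.toList.contains p) then (1 : Int) else 0)

-- ===== PRECONDITION & SPEC =====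
def Spec_check_punctuation (password : String) (out : Int) : Prop := out = check_punctuation_alt password
instance (password : String) (out : Int) : Decidable (Spec_check_punctuation password out) := by unfold Spec_check_punctuation; infer_instance

-- ===== CLAIM (what is proved, stated in full; the proofs are below) =====
def Claim_equal_check_punctuation : Prop := ∀ (password : String), Dom_check_punctuation password → Spec_check_punctuation password (check_punctuation password)

-- ===== LEMMAS AND PROOFS =====

-- A's loop from rating 0 returns 1 iff some char of the list is punctuation, else 0
theorem pvLoopA_char (cs : List Char) :
    pvLoopA cs 0 = if ∃ c ∈ cs, c ∈ pvPunctA then 1 else 0 := by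
  induction cs with
  | nil => simp [pvLoopA]
  | cons c cs ih =>
    by_cases h : c ∈ pvPunctA
    · simp [pvLoopA, h]
    · simp [pvLoopA, h, ih]

-- B's any over the punctuation string is the swapped existential
-- the punctuation string literal lists exactly the characters of pvPunctA
theorem pvPunctStr_toList : pvPunctStr.toList = pvPunctA := by decide

theorem pvAnyB_iff (l : List Char) :
    pvPunctStr.toList.any (fun p => l.contains p) = true ↔ ∃ c ∈ l, c ∈ pvPunctA := by
  rw [pvPunctStr_toList]
  simp only [List.any_eq_true, List.contains_eq_mem, decide_eq_true_eq]
  exact ⟨fun ⟨p, hp, hl⟩ => ⟨p, hl, hp⟩, fun ⟨c, hc, hp⟩ => ⟨c, hp, hc⟩⟩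

-- ===== VERDICT (by name: the statement is the Claim_ definition above) =====
theorem check_punctuation_spec : Claim_equal_check_punctuation := by
  intro password _
  unfold Spec_check_punctuation check_punctuation check_punctuation_alt
  rw [pvLoopA_char]
  by_cases h : ∃ c ∈ password.toList, c ∈ pvPunctA
  · rw [if_pos h, if_pos ((pvAnyB_iff password.toList).mpr h)]
  · rw [if_neg h, if_neg (fun hx => h ((pvAnyB_iff password.toList).mp hx))]
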